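-- pv_equiv track=rewrite | github.com/kiirogami/advent_of_code | aoc_2024/2/solution.py | check
-- ===== SOURCE A (Python) =====
-- def check(report):
--     if report[0] > report[1]:
--         report = report[::-1]
--     di = report[0]
--     for i in range(1, len(report)):
--         if (report[i] - di) >= 1 and (report[i] - di) <= 3:
--             di = report[i]
--         else:
--             return 0
--     else:
--         return 1
-- ===== SOURCE B (Python) =====
-- def check(report):
--     rev = report[0] > report[1]
--     s = sorted(report)
--     if report != (s[::-1] if rev else s):
--         return 0
--     if len(set(report)) != len(report):
--         return 0
--     return 1 if all(b - a <= 3 for a, b in zip(s, s[1:])) else 0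
-- ===== Notes on version B (the rewrite author's own statement) =====
-- stated objective: alternative
-- what changed: B abandons A's direction-normalised running scan: it sorts the report once, decides safety by comparing the report with its sorted (or reverse-sorted) form, testing duplicate-freeness via len(set(report)), and bounding the sorted adjacent gaps by 3.
import Mathlib
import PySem

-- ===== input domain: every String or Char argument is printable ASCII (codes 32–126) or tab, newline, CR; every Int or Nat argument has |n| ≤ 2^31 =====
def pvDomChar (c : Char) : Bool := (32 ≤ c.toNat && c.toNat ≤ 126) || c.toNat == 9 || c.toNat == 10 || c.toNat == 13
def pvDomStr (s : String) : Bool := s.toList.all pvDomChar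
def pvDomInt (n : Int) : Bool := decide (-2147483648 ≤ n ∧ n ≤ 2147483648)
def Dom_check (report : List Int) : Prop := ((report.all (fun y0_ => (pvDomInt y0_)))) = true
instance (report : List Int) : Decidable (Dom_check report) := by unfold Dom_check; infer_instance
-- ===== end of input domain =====

-- B replaces A's direction-normalising scan by a sort-based check: the report is safe
-- iff it equals its sorted (or reverse-sorted) version, has no duplicates, and the
-- sorted adjacent gaps are at most 3 (objective: alternative — sort-based, not a scan
-- of the input order; A is O(n), B is O(n log n)).

-- ===== PORT A =====
-- the 'for i in range(1, len r)' loop: di carries the previous value, early return 0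
def checkLoop (di : Int) : List Int → Int
  | [] => 1
  | x :: xs => if x - di ≥ 1 ∧ x - di ≤ 3 then checkLoop x xs else 0

def check (report : List Int) : Int :=
  let r := if (PySem.List.pyGetD report 0 0) > (PySem.List.pyGetD report 1 0)
           then ((PySem.List.slice? report none none (-1)).getD [])   -- report[::-1]
           else report
  let di := PySem.List.pyGetD r 0 0
  checkLoop di r.tail

-- ===== PORT B =====
def check_alt (report : List Int) : Int :=
  let s := PySem.List.sorted report (fun x => x) false
  if report ≠ (if (PySem.List.pyGetD report 0 0) > (PySem.List.pyGetD report 1 0)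
               then (PySem.List.slice? s none none (-1)).getD []      -- s[::-1]
               else s) then 0
  else if (PySem.Set.ofList report).length ≠ report.length then 0     -- len(set(report)) != len(report)
  else if ((s.zip (PySem.List.slice s (some 1) none)).map (fun p => p.2 - p.1)).all
            (fun d => decide (d ≤ 3)) then 1 else 0

-- ===== PRECONDITION & SPEC =====
-- A raises IndexError on report[1] (or report[0]) when the list has fewer than two elements; B raises there too.
def Pre_check (report : List Int) : Prop := 2 ≤ report.length
instance (report : List Int) : Decidable (Pre_check report) := by unfold Pre_check; infer_instance
def pvWitness_check : List Int := [1, 2, 4]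
def Spec_check (report : List Int) (out : Int) : Prop := out = check_alt report
instance (report : List Int) (out : Int) : Decidable (Spec_check report out) := by unfold Spec_check; infer_instance

-- ===== CLAIM (what is proved, stated in full; the proofs are below) =====
def Claim_equal_check : Prop := ∀ (report : List Int), Dom_check report → Pre_check report → Spec_check report (check report)

-- ===== LEMMAS AND PROOFS =====

-- A's step relation and B's gap relation
abbrev Rup (a b : Int) : Prop := 1 ≤ b - a ∧ b - a ≤ 3
abbrev Gle3 (a b : Int) : Prop := b - a ≤ 3

-- A's loop decides the step relation along the whole list
lemma checkLoop_eq_chain (xs : List Int) : ∀ d, checkLoop d xs = if List.IsChain Rup (d :: xs) then 1 else 0 := by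
  induction xs with
  | nil => intro d; simp [checkLoop]
  | cons x xs ih =>
      intro d
      simp only [checkLoop]
      by_cases h : x - d ≥ 1 ∧ x - d ≤ 3
      · rw [if_pos h, ih x]
        have hr : Rup d x := ⟨by omega, by omega⟩
        by_cases hc : List.IsChain Rup (x :: xs)
        · rw [if_pos hc, if_pos (List.isChain_cons_cons.mpr ⟨hr, hc⟩)]
        · rw [if_neg hc, if_neg (fun hch => hc (List.isChain_cons_cons.mp hch).2)]
      · rw [if_neg h, if_neg (fun hch => h (by
          have := (List.isChain_cons_cons.mp hch).1
          simp only [Rup] at this; omega))]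

-- B's zip-map-all decides the gap chain
lemma all_zip_chain (R : Int → Int → Prop) [DecidableRel R] (xs : List Int) :
    ((xs.zip xs.tail).all fun p => decide (R p.1 p.2)) = decide (List.IsChain R xs) := by
  induction xs with
  | nil => simp
  | cons a xs ih =>
      cases xs with
      | nil => simp
      | cons b t =>
          simp only [List.zip_cons_cons, List.all_cons, List.tail_cons] at *
          rw [ih]
          by_cases h : R a b <;> simp [h, List.isChain_cons_cons]

-- set(xs) keeps a sublist of xs
lemma ofList_sublist (xs : List Int) : (PySem.Set.ofList xs).Sublist xs := by
  induction xs with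
  | nil => simp [PySem.Set.ofList_nil]
  | cons x xs ih =>
      rw [PySem.Set.ofList_cons]
      exact List.Sublist.cons₂ x (List.Sublist.trans List.filter_sublist ih)

-- len(set(xs)) == len(xs) iff xs has no duplicates
lemma setlen_iff (xs : List Int) : (PySem.Set.ofList xs).length = xs.length ↔ xs.Nodup := by
  constructor
  · intro h
    have := (ofList_sublist xs).eq_of_length h
    rw [← this]; exact PySem.Set.nodup_ofList xs
  · intro h; rw [PySem.Set.ofList_eq_self_of_nodup xs h]

-- two chains on the same list combine
lemma chain_and {R S : Int → Int → Prop} : ∀ {l : List Int},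
    List.IsChain R l → List.IsChain S l → List.IsChain (fun a b => R a b ∧ S a b) l := by
  intro l
  induction l with
  | nil => intro _ _; exact List.isChain_nil
  | cons a l ih =>
      cases l with
      | nil => intro _ _; exact List.isChain_singleton a
      | cons b t =>
          intro hr hs
          obtain ⟨hr1, hr2⟩ := List.isChain_cons_cons.mp hr
          obtain ⟨hs1, hs2⟩ := List.isChain_cons_cons.mp hs
          exact List.isChain_cons_cons.mpr ⟨⟨hr1, hs1⟩, ih hr2 hs2⟩

-- the characterisation: a strict 1..3-step chain on m (a rearrangement of l) holds iff
-- m is sorted(l), l is duplicate-free, and the gaps along m are at most 3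
lemma chain_iff_sorted (l m : List Int) (hperm : m.Perm l) :
    List.IsChain Rup m ↔
      (PySem.List.sorted l (fun x => x) false = m ∧ l.Nodup ∧ List.IsChain Gle3 m) := by
  constructor
  · intro hc
    have hlt : List.Pairwise (fun a b : Int => a < b) m :=
      (hc.imp (fun {x y} h => by simp only [Rup] at h; omega)).pairwise
    refine ⟨PySem.List.sorted_eq_of_perm_of_pairwise_lt l m (fun x => x) hperm hlt,
      (hperm.nodup_iff).mp hlt.nodup, hc.imp (fun {x y} h => h.2)⟩
  · rintro ⟨hs, hnd, hg⟩
    have hle : List.Pairwise (fun a b : Int => a ≤ b) m := by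
      rw [← hs]; exact PySem.List.sorted_pairwise l (fun x => x)
    have hne : List.Pairwise (fun a b : Int => a ≠ b) m := (hperm.nodup_iff).mpr hnd
    have hlt : List.Pairwise (fun a b : Int => a < b) m :=
      (hle.and hne).imp (fun {x y} h => lt_of_le_of_ne h.1 h.2)
    exact (chain_and hlt.isChain hg).imp (fun {x y} h => ⟨by omega, h.2⟩)

-- ===== VERDICT (by name: the statement is the Claim_ definition above) =====
theorem check_spec : Claim_equal_check := by
  intro report _ hpre
  obtain ⟨a, b, t, rfl⟩ : ∃ a b t, report = a :: b :: t := by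
    match report with
    | [] => simp [Pre_check] at hpre
    | [a] => simp [Pre_check] at hpre
    | a :: b :: t => exact ⟨a, b, t, rfl⟩
  have hb1 : PySem.List.pyGetD (a :: b :: t) 1 0 = b := by simp [pysem]
  unfold Spec_check check check_alt
  simp only [PySem.List.slice?_none_none_neg_one, PySem.List.slice_from_one,
    Option.getD_some, PySem.List.pyGetD_zero_cons, hb1]
  set l : List Int := a :: b :: t with hl
  set s : List Int := PySem.List.sorted l (fun x => x) false with hsdef
  -- m : the direction-normalised list A scans
  set m : List Int := if a > b then l.reverse else l with hm
  have hperm : m.Perm l := by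
    rw [hm]; split
    · exact l.reverse_perm
    · exact List.Perm.refl l
  have hmne : m ≠ [] := by
    intro h0
    rw [h0] at hperm
    exact List.cons_ne_nil a (b :: t) hperm.symm.eq_nil
  -- A's value
  have hA : checkLoop (PySem.List.pyGetD m 0 0) m.tail
      = (if List.IsChain Rup m then (1 : Int) else 0) := by
    obtain ⟨y, ys, hys⟩ : ∃ y ys, m = y :: ys := List.exists_cons_of_ne_nil hmne
    rw [hys]
    simp only [PySem.List.pyGetD_zero_cons, List.tail_cons]
    rw [checkLoop_eq_chain, ← hys]
  -- B's first test is "s = m"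
  have hc1 : (l = (if a > b then s.reverse else s)) ↔ s = m := by
    rw [hm]; by_cases h : a > b
    · rw [if_pos h, if_pos h]
      constructor
      · intro he; simp [he]
      · intro he; simp [he]
    · rw [if_neg h, if_neg h]; exact eq_comm
  -- B's third test decides the gap chain on s
  have hgap : (((s.zip s.tail).map (fun p => p.2 - p.1)).all (fun d => decide (d ≤ 3)))
      = decide (List.IsChain Gle3 s) := by
    rw [List.all_map, ← all_zip_chain Gle3 s]
    rfl
  -- evaluate both sides through the characterisation
  rw [hA, if_congr (chain_iff_sorted l m hperm) rfl rfl]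
  simp only [hgap, ← hsdef]
  by_cases hs : s = m
  · have hleq := hc1.mpr hs
    have hcond : (s = m ∧ l.Nodup ∧ List.IsChain Gle3 m) ↔ (l.Nodup ∧ List.IsChain Gle3 s) := by
      constructor
      · rintro ⟨_, h2, h3⟩; exact ⟨h2, by rw [hs]; exact h3⟩
      · rintro ⟨h2, h3⟩; exact ⟨hs, h2, by rw [← hs]; exact h3⟩
    rw [if_congr hcond rfl rfl,
      if_neg (show ¬(l ≠ if a > b then s.reverse else s) from fun h => h hleq)]
    by_cases hnd : l.Nodup
    · rw [if_neg (show ¬(List.length (PySem.Set.ofList l) ≠ l.length) from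
        fun h => h ((setlen_iff l).mpr hnd))]
      by_cases hg : List.IsChain Gle3 s
      · rw [if_pos ⟨hnd, hg⟩, if_pos (by simpa using hg)]
      · rw [if_neg (show ¬(l.Nodup ∧ List.IsChain Gle3 s) from fun h => hg h.2),
          if_neg (by simpa using hg)]
    · rw [if_neg (show ¬(l.Nodup ∧ List.IsChain Gle3 s) from fun h => hnd h.1),
        if_pos (show List.length (PySem.Set.ofList l) ≠ l.length from
          fun h => hnd ((setlen_iff l).mp h))]
  · simp [hc1, hs]
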